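-- pv_equiv track=rewrite | github.com/crisdux/ejercicios-python | 21-ejercicio.py | calculo_anios_gato
-- ===== SOURCE A (Python) =====
-- def calculo_anios_gato(human_years):
--     anios_gato = 0
--     for edad in range(1, human_years+1):
--         if edad == 1:
--             anios_gato += 15
--         if edad == 2:
--             anios_gato += 9
--         if edad >=3:
--             anios_gato +=4
--     return anios_gato
-- ===== SOURCE B (Python) =====
-- def calculo_anios_gato(human_years):
--     if human_years <= 0:
--         return 0
--     if human_years == 1:
--         return 15
--     if human_years == 2:
--         return 24
--     return 24 + 4 * (human_years - 2)
-- ===== Notes on version B (the rewrite author's own statement) =====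
-- stated objective: faster
-- what changed: Replaced the year-by-year accumulation loop with a constant-time closed-form piecewise formula (base cat-years plus a linear term for ages three and up).
import Mathlib
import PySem

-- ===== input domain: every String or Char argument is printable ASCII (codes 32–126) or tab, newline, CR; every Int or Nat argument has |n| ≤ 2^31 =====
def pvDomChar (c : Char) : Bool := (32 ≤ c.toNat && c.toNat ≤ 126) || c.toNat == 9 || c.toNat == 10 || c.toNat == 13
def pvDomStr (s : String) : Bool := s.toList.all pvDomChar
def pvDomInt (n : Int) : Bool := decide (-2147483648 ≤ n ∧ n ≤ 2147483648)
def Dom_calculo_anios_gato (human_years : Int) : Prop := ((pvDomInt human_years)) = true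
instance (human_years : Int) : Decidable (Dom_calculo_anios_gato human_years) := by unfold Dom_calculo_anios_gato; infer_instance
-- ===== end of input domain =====

-- ===== PORT A =====
-- header: B replaces A's O(n) accumulation loop with a closed-form piecewise formula (objective: faster).
def calculo_anios_gato (human_years : Int) : Int :=
  (PySem.List.pyRange 1 (human_years + 1) 1).foldl
    (fun anios_gato edad =>
      let anios_gato := if edad == 1 then anios_gato + 15 else anios_gato
      let anios_gato := if edad == 2 then anios_gato + 9 else anios_gato
      if edad ≥ 3 then anios_gato + 4 else anios_gato) 0

-- ===== PORT B =====
def calculo_anios_gato_alt (human_years : Int) : Int :=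
  if human_years ≤ 0 then 0
  else if human_years = 1 then 15
  else if human_years = 2 then 24
  else 24 + 4 * (human_years - 2)

-- ===== PRECONDITION & SPEC =====
def Spec_calculo_anios_gato (human_years : Int) (out : Int) : Prop := out = calculo_anios_gato_alt human_years
instance (human_years : Int) (out : Int) : Decidable (Spec_calculo_anios_gato human_years out) := by unfold Spec_calculo_anios_gato; infer_instance

-- ===== CLAIM (what is proved, stated in full; the proofs are below) =====
def Claim_equal_calculo_anios_gato : Prop := ∀ (human_years : Int), Dom_calculo_anios_gato human_years → Spec_calculo_anios_gato human_years (calculo_anios_gato human_years)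

-- ===== LEMMAS AND PROOFS =====

def pvStep (anios_gato edad : Int) : Int :=
  let anios_gato := if edad == 1 then anios_gato + 15 else anios_gato
  let anios_gato := if edad == 2 then anios_gato + 9 else anios_gato
  if edad ≥ 3 then anios_gato + 4 else anios_gato

theorem pvFoldTail (k : Nat) : ∀ (a acc : Int), 3 ≤ a →
    (PySem.List.pyRange a (a + k) 1).foldl pvStep acc = acc + 4 * k := by
  induction k with
  | zero => intro a acc _; simp [PySem.List.pyRange_one_eq_nil]
  | succ m ih =>
    intro a acc ha
    rw [show (a + (m + 1 : Nat)) = (a + m) + 1 by push_cast; ring,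
        PySem.List.pyRange_one_succ_right (by omega),
        List.foldl_append, ih a acc ha]
    simp only [List.foldl_cons, List.foldl_nil, pvStep]
    have h1 : ¬ ((a + (m : Int)) == 1) := by simp; omega
    have h2 : ¬ ((a + (m : Int)) == 2) := by simp; omega
    have h3 : (a + (m : Int)) ≥ 3 := by omega
    simp only [h1, h2, if_neg, if_pos h3, if_false]
    push_cast; ring


-- ===== VERDICT (by name: the statement is the Claim_ definition above) =====
theorem calculo_anios_gato_spec : Claim_equal_calculo_anios_gato := by
  intro n _
  unfold Spec_calculo_anios_gato calculo_anios_gato calculo_anios_gato_alt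
  show (PySem.List.pyRange 1 (n + 1) 1).foldl pvStep 0 = _
  by_cases h0 : n ≤ 0
  · rw [PySem.List.pyRange_one_eq_nil (by omega)]; simp [h0]
  · by_cases h1 : n = 1
    · subst h1; decide
    · by_cases h2 : n = 2
      · subst h2; decide
      · have h3 : 3 ≤ n := by omega
        rw [PySem.List.pyRange_one_cons (by omega), show (1:Int)+1 = 2 from rfl,
            PySem.List.pyRange_one_cons (by omega), show (2:Int)+1 = 3 from rfl,
            show PySem.List.pyRange 3 (n+1) 1 = PySem.List.pyRange 3 (3 + ((n-2).toNat : Int)) 1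
              by congr 1; omega]
        simp only [List.foldl_cons]
        rw [show pvStep (pvStep 0 1) 2 = 24 from by decide, pvFoldTail _ 3 24 le_rfl]
        simp [h0, h1, h2]
        omega
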